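-- pv_equiv track=rewrite | github.com/spectacles-ci/spectacles | fonz/utils.py | mark_line
-- ===== SOURCE A (Python) =====
-- from typing import List, Sequence
--
-- def mark_line(lines: Sequence, line_number: int, char: str = "*") -> List:
--     """For a list of strings, mark a specified line with a prepended character."""
--     line_number -= 1  # Align with array indexing
--     marked = []
--     for i, line in enumerate(lines):
--         if i == line_number:
--             marked.append(char + " " + line)
--         else:
--             marked.append("| " + line)
--     return marked
-- ===== SOURCE B (Python) =====
-- from typing import List, Sequence
--
-- def mark_line(lines: Sequence, line_number: int, char: str = "*") -> List:
--     """Split at the marked index, pipe-prefix both sides, splice the marked line in between."""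
--     lines = list(lines)
--     idx = line_number - 1
--     if 0 <= idx < len(lines):
--         before = ["| " + line for line in lines[:idx]]
--         after = ["| " + line for line in lines[idx + 1:]]
--         return before + [char + " " + lines[idx]] + after
--     return ["| " + line for line in lines]
-- ===== Notes on version B (the rewrite author's own statement) =====
-- stated objective: alternative
-- what changed: Replaces A's single enumerate loop with a per-element index test by a split-and-splice construction: slice the list at the marked index, pipe-prefix the two unconditional halves, and concatenate them around the single marked line (no conditional inside any loop).
import Mathlib
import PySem

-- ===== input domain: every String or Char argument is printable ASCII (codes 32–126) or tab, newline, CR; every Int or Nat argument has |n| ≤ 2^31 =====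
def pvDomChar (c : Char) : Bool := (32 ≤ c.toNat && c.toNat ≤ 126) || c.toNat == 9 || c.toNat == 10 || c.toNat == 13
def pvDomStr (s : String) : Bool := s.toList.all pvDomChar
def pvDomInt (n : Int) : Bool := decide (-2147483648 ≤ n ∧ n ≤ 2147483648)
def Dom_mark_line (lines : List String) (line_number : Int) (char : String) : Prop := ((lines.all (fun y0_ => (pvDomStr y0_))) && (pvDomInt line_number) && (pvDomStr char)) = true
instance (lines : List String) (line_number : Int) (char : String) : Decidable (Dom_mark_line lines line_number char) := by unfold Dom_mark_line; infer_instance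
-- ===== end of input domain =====

-- B replaces A's enumerate loop with its per-element index test by a split-and-splice
-- construction: pipe-prefix the two slices around the marked index and splice the marked
-- line in between (alternative decomposition, same cost).


-- ===== PORT A =====
-- `line_number -= 1`; then for i, line in enumerate(lines): append marked/pipe line.
def mark_line (lines : List String) (line_number : Int) (char : String) : List String :=
  let ln := line_number - 1
  (PySem.List.enumerate lines).foldl
    (fun marked p =>
      if p.1 = ln then marked ++ [char ++ " " ++ p.2]
      else marked ++ ["| " ++ p.2]) []

-- ===== PORT B =====
-- slice at idx, pipe-prefix both halves, splice the single marked line in between.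
def mark_line_alt (lines : List String) (line_number : Int) (char : String) : List String :=
  let idx := line_number - 1
  if 0 ≤ idx ∧ idx < (lines.length : Int) then
    (PySem.List.slice lines none (some idx)).map (fun line => "| " ++ line) ++
    [char ++ " " ++ PySem.List.pyGetD lines idx ""] ++
    (PySem.List.slice lines (some (idx + 1)) none).map (fun line => "| " ++ line)
  else
    lines.map (fun line => "| " ++ line)

-- ===== PRECONDITION & SPEC =====
def Spec_mark_line (lines : List String) (line_number : Int) (char : String) (out : List String) : Prop := out = mark_line_alt lines line_number char
instance (lines : List String) (line_number : Int) (char : String) (out : List String) : Decidable (Spec_mark_line lines line_number char out) := by unfold Spec_mark_line; infer_instance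

-- ===== CLAIM (what is proved, stated in full; the proofs are below) =====
def Claim_equal_mark_line : Prop := ∀ (lines : List String) (line_number : Int) (char : String), Dom_mark_line lines line_number char → Spec_mark_line lines line_number char (mark_line lines line_number char)

-- ===== LEMMAS AND PROOFS =====

-- A's loop body reshaped so the appended singleton is a single `if` term, then foldl → map.
theorem mark_line_eq_map (lines : List String) (ln : Int) (char : String) :
    (PySem.List.enumerate lines).foldl
      (fun marked p =>
        if p.1 = ln then marked ++ [char ++ " " ++ p.2]
        else marked ++ ["| " ++ p.2]) []
    = (PySem.List.enumerate lines).map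
        (fun p => if p.1 = ln then char ++ " " ++ p.2 else "| " ++ p.2) := by
  have hbody :
      (fun (marked : List String) (p : Int × String) =>
        if p.1 = ln then marked ++ [char ++ " " ++ p.2]
        else marked ++ ["| " ++ p.2])
      = (fun marked p =>
          marked ++ [if p.1 = ln then char ++ " " ++ p.2 else "| " ++ p.2]) := by
    funext marked p; split <;> rfl
  rw [hbody, PySem.List.foldl_append_singleton_eq_map]
  simp

-- ===== VERDICT (by name: the statement is the Claim_ definition above) =====
theorem mark_line_spec : Claim_equal_mark_line := by
  intro lines line_number char _
  unfold Spec_mark_line mark_line mark_line_alt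
  simp only []
  rw [mark_line_eq_map]
  set ln := line_number - 1 with hln
  by_cases hr : 0 ≤ ln ∧ ln < (lines.length : Int)
  · rw [if_pos hr]
    rw [PySem.List.slice_to lines hr.1, PySem.List.slice_from lines (by omega : (0:Int) ≤ ln + 1)]
    have hiN : ln.toNat < lines.length := by omega
    have h1N : (ln + 1).toNat = ln.toNat + 1 := by omega
    rw [PySem.List.pyGetD_eq_getElem lines "" hr.1 hr.2, h1N]
    apply List.ext_getElem
    · simp [PySem.List.length_enumerate]
      omega
    · intro i h1 h2
      have hi : i < lines.length := by
        simpa [PySem.List.length_enumerate] using h1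
      rw [List.getElem_map, PySem.List.getElem_enumerate]
      by_cases hlt : i < ln.toNat
      · have hne : ¬ ((0 : Int) + (i : Int) = ln) := by omega
        rw [if_neg hne]
        rw [List.getElem_append_left (by simp; omega),
            List.getElem_append_left (by simp; omega)]
        rw [List.getElem_map, List.getElem_take]
      · by_cases heq : i = ln.toNat
        · have h0 : (0 : Int) + (i : Int) = ln := by omega
          rw [if_pos h0]
          rw [List.getElem_append_left (by simp; omega),
              List.getElem_append_right (by simp; omega)]
          have hz : i - ((lines.take ln.toNat).map (fun line => "| " ++ line)).length = 0 := by
            simp; omega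
          simp [heq]
        · have hne : ¬ ((0 : Int) + (i : Int) = ln) := by omega
          rw [if_neg hne]
          rw [List.getElem_append_right (by simp; omega)]
          rw [List.getElem_map, List.getElem_drop]
          have hxl : ((lines.take ln.toNat).map (fun line => "| " ++ line) ++
              [char ++ " " ++ lines[ln.toNat]]).length = ln.toNat + 1 := by
            simp; omega
          have hidx : ln.toNat + 1 + (i - ((lines.take ln.toNat).map (fun line => "| " ++ line) ++
              [char ++ " " ++ lines[ln.toNat]]).length) = i := by
            rw [hxl]; omega
          simp only [hidx]
  · rw [if_neg hr]
    apply List.ext_getElem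
    · simp [PySem.List.length_enumerate]
    · intro i h1 h2
      have hi : i < lines.length := by
        simpa [PySem.List.length_enumerate] using h1
      rw [List.getElem_map, PySem.List.getElem_enumerate, List.getElem_map]
      have hne : ¬ ((0 : Int) + (i : Int) = ln) := by
        push Not at hr
        by_cases hz : 0 ≤ ln
        · have := hr hz; omega
        · omega
      rw [if_neg hne]
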